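-- pv_equiv track=rewrite | github.com/kd4d/Contest-Log-Analyzer | test_code/manage_headers.py | extract_purpose_block
-- ===== SOURCE A (Python) =====
-- METADATA_KEYS = {"Author", "Date", "Version", "Copyright", "License", "Contact"}
--
-- def extract_purpose_block(header_lines):
--     """
--     Finds the purpose block anywhere in the header and extracts it.
--     The block starts with '# Purpose:' and ends at a blank comment
--     line that is followed by a metadata line.
--     """
--     start_index = -1
--     # Find the start of the block by looking for the # Purpose: tag
--     for i, line in enumerate(header_lines):
--         if line.strip().lower().startswith("# purpose:"):
--             start_index = i
--             break
--
--     # If no purpose tag is found, return the default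
--     if start_index == -1:
--         return ["# Purpose: [Description of the script's purpose]"]
--
--     # Find the end of the block
--     end_index = -1
--     for i in range(start_index + 1, len(header_lines)):
--         stripped_line = header_lines[i].strip()
--         # The block ends with a blank comment line...
--         if stripped_line == "#":
--             # ...that is followed by a known metadata tag.
--             if (i + 1) < len(header_lines):
--                 next_line = header_lines[i+1].strip()
--                 if next_line.startswith("#") and ":" in next_line:
--                     key = next_line.split(':', 1)[0][1:].strip()
--                     if key in METADATA_KEYS:
--                         end_index = i
--                         break
--
--     # If a valid end was found, slice the header to get the block
--     if end_index != -1: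
--         return [line.rstrip() for line in header_lines[start_index:end_index]]
--
--     # If no specific end was found, assume it runs to the revision history
--     purpose_block = []
--     for line in header_lines[start_index:]:
--         if "--- Revision History ---" in line:
--             break
--         purpose_block.append(line.rstrip())
--     return purpose_block
-- ===== SOURCE B (Python) =====
-- METADATA_KEYS = {"Author", "Date", "Version", "Copyright", "License", "Contact"}
--
--
-- def extract_purpose_block(header_lines):
--     """Single pass with a searching/collecting state machine instead of
--     three separate index loops and slicing."""
--     collecting = False
--     prev_blank = False          # previous collected line stripped to '#'
--     block = []                  # rstripped lines collected since the tag
--     rev_block = None            # block frozen at the first revision marker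
--     for line in header_lines:
--         if not collecting:
--             if not line.strip().lower().startswith("# purpose:"):
--                 continue
--             collecting = True
--         stripped = line.strip()
--         if prev_blank and stripped.startswith("#") and ":" in stripped:
--             key = stripped.split(":", 1)[0][1:].strip()
--             if key in METADATA_KEYS:
--                 return block[:-1]
--         if rev_block is None and "--- Revision History ---" in line:
--             rev_block = list(block)
--         block.append(line.rstrip())
--         prev_blank = stripped == "#"
--     if not collecting:
--         return ["# Purpose: [Description of the script's purpose]"]
--     return block if rev_block is None else rev_block
-- ===== Notes on version B (the rewrite author's own statement) =====
-- stated objective: alternative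
-- what changed: Replaced A's three separate index loops (find start, scan index pairs for a metadata end, then re-slice / re-scan for the revision marker) by one single pass over the lines with a searching/collecting state machine that remembers whether the previous collected line was a blank '#' and freezes a fallback block at the first revision marker.
import Mathlib
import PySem

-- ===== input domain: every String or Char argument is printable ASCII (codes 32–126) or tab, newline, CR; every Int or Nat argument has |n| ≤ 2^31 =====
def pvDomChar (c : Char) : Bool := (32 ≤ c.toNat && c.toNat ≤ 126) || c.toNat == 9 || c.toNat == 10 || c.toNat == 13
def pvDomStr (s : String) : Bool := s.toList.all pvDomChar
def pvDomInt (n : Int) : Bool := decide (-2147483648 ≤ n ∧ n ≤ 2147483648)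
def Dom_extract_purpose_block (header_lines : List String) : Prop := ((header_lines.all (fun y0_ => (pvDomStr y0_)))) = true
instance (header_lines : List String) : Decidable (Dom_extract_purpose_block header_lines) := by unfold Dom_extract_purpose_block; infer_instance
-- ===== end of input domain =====

-- B does the same extraction as one single pass with a searching/collecting state machine
-- instead of A's three separate index loops; same cost, different decomposition.

-- ===== PORT A =====
-- shared transliterations of string tests both Pythons spell identically
def metadata_keys : PySem.Set String :=
  PySem.Set.ofList ["Author", "Date", "Version", "Copyright", "License", "Contact"]

-- line.strip().lower().startswith("# purpose:")
def isTagLine (l : String) : Bool :=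
  PySem.Str.startswith (PySem.Str.lower (PySem.Str.strip l)) "# purpose:"

-- stripped == "#"
def isBlankComment (l : String) : Bool := PySem.Str.strip l == "#"

-- n.startswith("#") and ":" in n and n.split(':',1)[0][1:].strip() in METADATA_KEYS, for n = l.strip()
def isMetaLine (l : String) : Bool :=
  let n := PySem.Str.strip l
  PySem.Str.startswith n "#" && PySem.Str.isIn ":" n &&
    PySem.Set.contains metadata_keys
      (PySem.Str.strip (PySem.Str.slice (((PySem.Str.splitMax? n ":" 1).getD []).headD "") (some 1) none))

-- "--- Revision History ---" in line
def hasRevMarker (l : String) : Bool := PySem.Str.isIn "--- Revision History ---" l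

-- first loop: for i, line in enumerate(...): if tag: start_index = i; break
def pyA_findStart : List String → Nat → Option Nat
  | [], _ => none
  | l :: rest, i => if isTagLine l then some i else pyA_findStart rest (i + 1)

-- second loop over i in range(start+1, len), checking header_lines[i] and its successor
def pyA_findEnd : List String → Nat → Option Nat
  | c :: n :: rest, i =>
      if isBlankComment c && isMetaLine n then some i else pyA_findEnd (n :: rest) (i + 1)
  | _, _ => none

-- fallback loop appending rstripped lines until the revision marker
def pyA_revLoop : List String → List String → List String
  | [], acc => acc
  | l :: rest, acc => if hasRevMarker l then acc else pyA_revLoop rest (acc ++ [PySem.Str.rstrip l])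

def extract_purpose_block (header_lines : List String) : List String :=
  match pyA_findStart header_lines 0 with
  | none => ["# Purpose: [Description of the script's purpose]"]
  | some s =>
    match pyA_findEnd (PySem.List.slice header_lines (some ((s + 1 : Nat) : Int)) none) (s + 1) with
    | some e =>
        (PySem.List.slice header_lines (some ((s : Nat) : Int)) (some ((e : Nat) : Int))).map
          PySem.Str.rstrip
    | none => pyA_revLoop (PySem.List.slice header_lines (some ((s : Nat) : Int)) none) []

-- ===== PORT B =====
-- the single state-machine pass of Source B: collecting flag, prev-blank flag, block, frozen rev block
def pyB_loop : List String → Bool → Bool → List String → Option (List String) → List String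
  | [], collecting, _, block, rev =>
      if collecting then (match rev with | none => block | some r => r)
      else ["# Purpose: [Description of the script's purpose]"]
  | line :: rest, collecting, pb, block, rev =>
      if !collecting && !isTagLine line then pyB_loop rest collecting pb block rev
      else if pb && isMetaLine line then PySem.List.slice block none (some (-1))
      else
        pyB_loop rest true (isBlankComment line) (block ++ [PySem.Str.rstrip line])
          (if rev.isNone && hasRevMarker line then some block else rev)

def extract_purpose_block_alt (header_lines : List String) : List String :=
  pyB_loop header_lines false false [] none

-- ===== PRECONDITION & SPEC =====
def Spec_extract_purpose_block (header_lines : List String) (out : List String) : Prop := out = extract_purpose_block_alt header_lines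
instance (header_lines : List String) (out : List String) : Decidable (Spec_extract_purpose_block header_lines out) := by unfold Spec_extract_purpose_block; infer_instance

-- ===== CLAIM (what is proved, stated in full; the proofs are below) =====
def Claim_equal_extract_purpose_block : Prop := ∀ (header_lines : List String), Dom_extract_purpose_block header_lines → Spec_extract_purpose_block header_lines (extract_purpose_block header_lines)

-- ===== LEMMAS AND PROOFS =====

-- relative position (in xs) of the first metadata line whose immediate predecessor stripped to '#'
def findPairIdx : Bool → List String → Option Nat
  | _, [] => none
  | pb, y :: ys =>
      if pb && isMetaLine y then some 0 else (findPairIdx (isBlankComment y) ys).map (· + 1)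

theorem pyA_findStart_shift (l : List String) (i : Nat) :
    pyA_findStart l i = (pyA_findStart l 0).map (· + i) := by
  induction l generalizing i with
  | nil => simp [pyA_findStart]
  | cons x xs ih =>
    simp only [pyA_findStart]
    by_cases h : isTagLine x
    · simp [h]
    · simp only [h]
      rw [ih (i + 1), ih 1]
      cases pyA_findStart xs 0 <;> (simp; try omega)

theorem pyA_findEnd_shift (l : List String) (i : Nat) :
    pyA_findEnd l i = (pyA_findEnd l 0).map (· + i) := by
  induction l generalizing i with
  | nil => simp [pyA_findEnd]
  | cons x xs ih =>
    cases xs with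
    | nil => simp [pyA_findEnd]
    | cons n rs =>
      simp only [pyA_findEnd]
      by_cases h : isBlankComment x && isMetaLine n
      · simp [h]
      · simp only [h]
        rw [ih (i + 1), ih 1]
        cases pyA_findEnd (n :: rs) 0 <;> (simp; try omega)

theorem findPairIdx_eq_findEnd (xs : List String) : ∀ (x : String),
    findPairIdx (isBlankComment x) xs = pyA_findEnd (x :: xs) 0 := by
  induction xs with
  | nil => intro x; simp [findPairIdx, pyA_findEnd]
  | cons y ys ih =>
    intro x
    simp only [findPairIdx, pyA_findEnd]
    by_cases h : isBlankComment x && isMetaLine y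
    · simp [h]
    · simp only [h]
      rw [pyA_findEnd_shift (y :: ys) 1, ih y]

theorem pyA_findEnd_lt (l : List String) : ∀ (i e : Nat), pyA_findEnd l i = some e →
    i ≤ e ∧ e - i + 1 < l.length := by
  induction l with
  | nil => intro i e h; simp [pyA_findEnd] at h
  | cons x xs ih =>
    intro i e h
    cases xs with
    | nil => simp [pyA_findEnd] at h
    | cons n rs =>
      simp only [pyA_findEnd] at h
      by_cases hc : isBlankComment x && isMetaLine n
      · simp [hc] at h
        subst h
        simp only [List.length_cons]
        omega
      · simp only [hc] at h
        have := ih (i + 1) e h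
        simp only [List.length_cons] at this ⊢
        omega

theorem pyA_revLoop_eq (l : List String) : ∀ (acc : List String),
    pyA_revLoop l acc = acc ++ (l.takeWhile (fun x => !hasRevMarker x)).map PySem.Str.rstrip := by
  induction l with
  | nil => intro acc; simp [pyA_revLoop]
  | cons x xs ih =>
    intro acc
    simp only [pyA_revLoop, List.takeWhile]
    by_cases h : hasRevMarker x
    · simp [h]
    · simp [h, ih]

theorem blank_of_tag_false (l : String) (h : isTagLine l = true) : isBlankComment l = false := by
  by_contra hb
  have hb' : PySem.Str.strip l = "#" := by
    have := eq_true_of_ne_false hb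
    simpa [isBlankComment] using this
  rw [isTagLine, hb'] at h
  exact absurd h (by decide)

theorem pyA_findEnd_cons_not_blank (x : String) (xs : List String)
    (h : isBlankComment x = false) :
    pyA_findEnd (x :: xs) 0 = (pyA_findEnd xs 0).map (· + 1) := by
  cases xs with
  | nil => simp [pyA_findEnd]
  | cons n rs =>
    simp only [pyA_findEnd, h, Bool.false_and]
    rw [pyA_findEnd_shift (n :: rs) 1]
    simp

-- A with its slices written as drop/take
theorem extract_purpose_block_closed (hl : List String) :
    extract_purpose_block hl =
      match pyA_findStart hl 0 with
      | none => ["# Purpose: [Description of the script's purpose]"]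
      | some s =>
        match pyA_findEnd (hl.drop (s + 1)) (s + 1) with
        | some e => ((hl.drop s).take (e - s)).map PySem.Str.rstrip
        | none => pyA_revLoop (hl.drop s) [] := by
  unfold extract_purpose_block
  simp only [PySem.List.slice_from_natCast, PySem.List.slice_natCast]

-- the collecting phase of B, characterised by findPairIdx / takeWhile
theorem pyB_loop_collect (t : List String) : ∀ (pb : Bool) (block : List String)
    (rev : Option (List String)),
    pyB_loop t true pb block rev =
      match findPairIdx pb t with
      | some j => (block ++ (t.take j).map PySem.Str.rstrip).dropLast
      | none =>
          rev.getD (block ++ (t.takeWhile (fun x => !hasRevMarker x)).map PySem.Str.rstrip) := by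
  induction t with
  | nil =>
    intro pb block rev
    cases rev <;> simp [pyB_loop, findPairIdx, Option.getD]
  | cons x xs ih =>
    intro pb block rev
    simp only [pyB_loop, Bool.not_true, Bool.false_and, Bool.false_eq_true, if_false,
      findPairIdx]
    by_cases h : pb && isMetaLine x
    · simp [h, PySem.List.slice_to_neg_one]
    · simp only [h]
      rw [ih]
      cases hf : findPairIdx (isBlankComment x) xs with
      | some j =>
        simp [List.take_succ_cons, List.append_assoc]
      | none =>
        simp only [Option.map_none]
        by_cases hr : hasRevMarker x
        · cases rev with
          | none => simp [hr, Option.getD]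
          | some r => simp [hr, Option.getD]
        · cases rev with
          | none => simp [hr, Option.getD]
          | some r => simp [hr, Option.getD]

theorem dropLast_take_succ {α : Type} (l : List α) (k : Nat) (h : k + 1 < l.length) :
    (List.take (k + 1) l).dropLast = List.take k l := by
  rw [List.dropLast_eq_take, List.length_take, List.take_take]
  congr 1
  omega

theorem map_take_succ_ne_nil (l : List String) (k : Nat) (h : k + 1 < l.length) :
    List.map PySem.Str.rstrip (List.take (k + 1) l) ≠ [] := by
  intro hc
  rw [List.map_eq_nil_iff] at hc
  have hlen := congrArg List.length hc
  rw [List.length_take] at hlen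
  simp only [List.length_nil] at hlen
  omega

-- head of the list is the purpose tag: both sides computed explicitly
theorem extract_eq_tag (x : String) (rest : List String) (htag : isTagLine x = true) :
    extract_purpose_block (x :: rest) = extract_purpose_block_alt (x :: rest) := by
  have hblank : isBlankComment x = false := blank_of_tag_false x htag
  rw [extract_purpose_block_closed]
  unfold extract_purpose_block_alt
  simp only [pyA_findStart, htag, if_true, List.drop_succ_cons, List.drop_zero]
  rw [pyA_findEnd_shift rest 1]
  simp only [pyB_loop, Bool.not_false, htag, Bool.not_true, Bool.and_false,
    Bool.false_and, Bool.false_eq_true, if_false]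
  rw [pyB_loop_collect, findPairIdx_eq_findEnd rest x,
    pyA_findEnd_cons_not_blank x rest hblank]
  cases hE : pyA_findEnd rest 0 with
  | some k =>
    have hk := pyA_findEnd_lt rest 0 k hE
    simp only [Option.map_some]
    rw [Nat.sub_zero, List.take_succ_cons, List.map_cons, List.nil_append,
      List.singleton_append, List.dropLast_cons_of_ne_nil (map_take_succ_ne_nil rest k (by omega)),
      ← List.map_dropLast, dropLast_take_succ rest k (by omega)]
  | none =>
    simp only [Option.map_none]
    rw [pyA_revLoop_eq]
    by_cases hr : hasRevMarker x
    · simp [hr, Option.getD]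
    · simp [hr, Option.getD]

theorem extract_eq (header_lines : List String) :
    extract_purpose_block header_lines = extract_purpose_block_alt header_lines := by
  induction header_lines with
  | nil => rfl
  | cons x rest ih =>
    by_cases htag : isTagLine x
    · exact extract_eq_tag x rest htag
    · have htag' : isTagLine x = false := by simpa using htag
      rw [extract_purpose_block_closed] at ih ⊢
      unfold extract_purpose_block_alt at ih ⊢
      simp only [pyA_findStart, htag', Bool.false_eq_true, if_false]
      rw [pyA_findStart_shift rest 1]
      simp only [pyB_loop, Bool.not_false, htag', Bool.true_and, if_true]
      cases hS : pyA_findStart rest 0 with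
      | none =>
        simp only [Option.map_none]
        simpa [hS] using ih
      | some s =>
        simp only [hS, Option.map_some] at ih ⊢
        simp only [List.drop_succ_cons]
        rw [pyA_findEnd_shift (rest.drop (s + 1)) (s + 1 + 1)]
        rw [pyA_findEnd_shift (rest.drop (s + 1)) (s + 1)] at ih
        cases hD : pyA_findEnd (rest.drop (s + 1)) 0 with
        | none =>
          simp only [hD, Option.map_none] at ih ⊢
          exact ih
        | some k =>
          simp only [hD, Option.map_some] at ih ⊢
          rw [show k + (s + 1 + 1) - (s + 1) = k + (s + 1) - s by omega]
          exact ih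

-- ===== VERDICT (by name: the statement is the Claim_ definition above) =====
theorem extract_purpose_block_spec : Claim_equal_extract_purpose_block := by
  intro hl _
  unfold Spec_extract_purpose_block
  exact extract_eq hl
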